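-- pv_equiv track=rewrite | github.com/WGabrielCode/Algorithms_DataStructures | Algorithms_and_DataStructures/1part/2/MedianCube.py | to_cube
-- ===== SOURCE A (Python) =====
-- def to_cube( T , n) :
-- 	new_T = [ [ 0 for i in range( n ) ] for j in range( n) ]
-- 	idx = 0
-- 	for i in range( n-1 ) :
-- 		for j in range( 1 + i , n) :
-- 			new_T[j][i] = T[ idx ]
-- 			idx += 1
--
-- 	for i in range( n ) :
-- 		new_T[i][i] = T[idx]
-- 		idx += 1
--
-- 	for i in range( 1 , n ) :
-- 		for j in range( i ) :
-- 			new_T[j][i] = T[ idx ]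
-- 			idx += 1
-- 	return new_T
-- ===== SOURCE B (Python) =====
-- def to_cube(T, n):
--     # Closed-form index map: cell (r, c) reads T at an arithmetically
--     # computed position, so the matrix is built directly by comprehension
--     # with no mutation and no running counter.
--     L = n * (n - 1) // 2
--     def idx(r, c):
--         if c < r:
--             return c * (2 * n - c - 1) // 2 + (r - c - 1)
--         if c == r:
--             return L + r
--         return L + n + c * (c - 1) // 2 + r
--     return [[T[idx(r, c)] for c in range(n)] for r in range(n)]
-- ===== Notes on version B (the rewrite author's own statement) =====
-- stated objective: alternative
-- what changed: Replaces A's three mutating passes that fill a zeroed matrix while threading a running index through interleaved nested loops by a mutation-free nested comprehension that computes each cell's source position in T directly with a closed-form arithmetic index function (triangular-number formulas for the lower-triangle, diagonal and upper-triangle blocks).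
import Mathlib
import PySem

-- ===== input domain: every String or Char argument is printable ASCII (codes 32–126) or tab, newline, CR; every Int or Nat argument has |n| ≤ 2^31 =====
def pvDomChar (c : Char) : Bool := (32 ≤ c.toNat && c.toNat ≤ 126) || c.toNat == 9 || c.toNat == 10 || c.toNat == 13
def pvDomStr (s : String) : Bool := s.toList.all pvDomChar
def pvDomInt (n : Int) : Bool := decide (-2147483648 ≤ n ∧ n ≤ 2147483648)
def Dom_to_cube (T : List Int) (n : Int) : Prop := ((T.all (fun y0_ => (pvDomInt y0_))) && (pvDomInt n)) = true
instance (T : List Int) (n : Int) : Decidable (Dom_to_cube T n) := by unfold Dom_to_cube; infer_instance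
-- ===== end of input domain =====

-- B replaces A's three mutating passes with a running index by a mutation-free
-- nested comprehension whose cell (r, c) reads T at a closed-form arithmetic
-- position (objective: alternative algorithm, same cost).

-- shared helper: the port of the Python statement `new_T[r][c] = v` (A's only
-- mutation); exact for the 0 ≤ r, c < n indices A's loops produce
def pvSet2 (m : List (List Int)) (r c : Int) (v : Int) : List (List Int) :=
  PySem.List.pySetD m r (PySem.List.pySetD (PySem.List.pyGetD m r []) c v)

-- ===== PORT A =====
def to_cube (T : List Int) (n : Int) : List (List Int) :=
  let new_T : List (List Int) :=
    (PySem.List.pyRange 0 n 1).map (fun _ => (PySem.List.pyRange 0 n 1).map (fun _ => (0 : Int)))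
  let s1 : List (List Int) × Int :=
    (PySem.List.pyRange 0 (n - 1) 1).foldl
      (fun s i => (PySem.List.pyRange (1 + i) n 1).foldl
        (fun s j => (pvSet2 s.1 j i (PySem.List.pyGetD T s.2 0), s.2 + 1)) s)
      (new_T, 0)
  let s2 : List (List Int) × Int :=
    (PySem.List.pyRange 0 n 1).foldl
      (fun s i => (pvSet2 s.1 i i (PySem.List.pyGetD T s.2 0), s.2 + 1)) s1
  let s3 : List (List Int) × Int :=
    (PySem.List.pyRange 1 n 1).foldl
      (fun s i => (PySem.List.pyRange 0 i 1).foldl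
        (fun s j => (pvSet2 s.1 j i (PySem.List.pyGetD T s.2 0), s.2 + 1)) s)
      s2
  s3.1

-- ===== PORT B =====
def to_cube_alt (T : List Int) (n : Int) : List (List Int) :=
  let L : Int := PySem.Int.floordiv (n * (n - 1)) 2
  (PySem.List.pyRange 0 n 1).map (fun r =>
    (PySem.List.pyRange 0 n 1).map (fun c =>
      PySem.List.pyGetD T
        (if c < r then PySem.Int.floordiv (c * (2 * n - c - 1)) 2 + (r - c - 1)
         else if c = r then L + r
         else L + n + PySem.Int.floordiv (c * (c - 1)) 2 + r) 0))

-- ===== PRECONDITION & SPEC =====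
-- Pre_ excludes exactly the inputs on which Python A raises IndexError:
-- with n ≥ 1 the loops read T[0..n*n-1], so A raises iff T is shorter than n*n.
def Pre_to_cube (T : List Int) (n : Int) : Prop := n ≤ 0 ∨ n * n ≤ (T.length : Int)
instance (T : List Int) (n : Int) : Decidable (Pre_to_cube T n) := by unfold Pre_to_cube; infer_instance
def pvWitness_to_cube : List Int × Int := ([1, 2, 3, 4, 5, 6, 7, 8, 9], 3)

def Spec_to_cube (T : List Int) (n : Int) (out : List (List Int)) : Prop := out = to_cube_alt T n
instance (T : List Int) (n : Int) (out : List (List Int)) : Decidable (Spec_to_cube T n out) := by unfold Spec_to_cube; infer_instance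

-- ===== CLAIM (what is proved, stated in full; the proofs are below) =====
def Claim_equal_to_cube : Prop := ∀ (T : List Int) (n : Int), Dom_to_cube T n → Pre_to_cube T n → Spec_to_cube T n (to_cube T n)

-- ===== LEMMAS AND PROOFS =====

-- reading a cell of the matrix (used only at nonnegative indices)
def pvGet2 (m : List (List Int)) (r c : Int) : Int :=
  (m.getD r.toNat []).getD c.toNat 0

-- the matrix is N rows of N entries
def pvShape (N : Nat) (m : List (List Int)) : Prop :=
  m.length = N ∧ ∀ row ∈ m, row.length = N

-- running total of A's first pass: pvSumLow n a d = Σ_{i=a}^{a+d-1} (n-1-i)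
def pvSumLow (n a : Int) : Nat → Int
  | 0 => 0
  | Nat.succ d => (n - 1 - a) + pvSumLow n (a + 1) d

-- running total of A's third pass: pvSumUp a d = Σ_{i=a}^{a+d-1} i
def pvSumUp (a : Int) : Nat → Int
  | 0 => 0
  | Nat.succ d => a + pvSumUp (a + 1) d

theorem pvSumLow_closed (n : Int) : ∀ (d : Nat) (a : Int),
    2 * pvSumLow n a d = d * (2 * n - 2 * a - 1 - d) := by
  intro d
  induction d with
  | zero => intro a; simp [pvSumLow]
  | succ d ih =>
    intro a
    have h := ih (a + 1)
    simp only [pvSumLow]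
    push_cast
    linear_combination h

theorem pvSumUp_closed : ∀ (d : Nat) (a : Int),
    2 * pvSumUp a d = d * (2 * a + d - 1) := by
  intro d
  induction d with
  | zero => intro a; simp [pvSumUp]
  | succ d ih =>
    intro a
    have h := ih (a + 1)
    simp only [pvSumUp]
    push_cast
    linear_combination h

theorem pv_floordiv_double (x S : Int) (h : x = 2 * S) : PySem.Int.floordiv x 2 = S := by
  rw [PySem.Int.floordiv_eq_ediv_of_pos (by norm_num), h]
  exact Int.mul_ediv_cancel_left S (by norm_num)
theorem pvSet2_eq {N : Nat} {m : List (List Int)} (hm : pvShape N m)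
    (r c : Int) (hr0 : 0 ≤ r) (hrN : r < (N : Int)) (hc0 : 0 ≤ c) (v : Int) :
    pvSet2 m r c v = m.set r.toNat ((m.getD r.toNat []).set c.toNat v) := by
  have hlen := hm.1
  have hr : r < (m.length : Int) := by omega
  have hrn : r.toNat < m.length := by omega
  unfold pvSet2
  rw [PySem.List.pyGetD_eq_getElem m [] hr0 hr, PySem.List.pySetD_of_nonneg _ _ hc0,
      PySem.List.pySetD_of_nonneg _ _ hr0, List.getD_eq_getElem _ _ hrn]

theorem pvShape_pvSet2 {N : Nat} {m : List (List Int)} (hm : pvShape N m)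
    (r c : Int) (hr0 : 0 ≤ r) (hrN : r < (N : Int)) (hc0 : 0 ≤ c) (v : Int) :
    pvShape N (pvSet2 m r c v) := by
  rw [pvSet2_eq hm r c hr0 hrN hc0 v]
  have hrn : r.toNat < m.length := by have := hm.1; omega
  refine ⟨by simpa using hm.1, ?_⟩
  intro row hrow
  rcases List.mem_or_eq_of_mem_set hrow with h | h
  · exact hm.2 row h
  · subst h
    rw [List.length_set, List.getD_eq_getElem _ _ hrn]
    exact hm.2 _ (List.getElem_mem _)

theorem pvGet2_pvSet2 {N : Nat} {m : List (List Int)} (hm : pvShape N m)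
    (r c : Int) (hr0 : 0 ≤ r) (hrN : r < (N : Int)) (hc0 : 0 ≤ c) (hcN : c < (N : Int)) (v : Int)
    (r' c' : Int) (hr'0 : 0 ≤ r') (hc'0 : 0 ≤ c') :
    pvGet2 (pvSet2 m r c v) r' c' = if r' = r ∧ c' = c then v else pvGet2 m r' c' := by
  have hmN := hm.1
  have hrn : r.toNat < m.length := by omega
  have hrowlen : (m.getD r.toNat []).length = N := by
    rw [List.getD_eq_getElem _ _ hrn]
    exact hm.2 _ (List.getElem_mem _)
  rw [pvSet2_eq hm r c hr0 hrN hc0 v]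
  unfold pvGet2
  by_cases hr' : r' = r
  · subst hr'
    have houter : (m.set r'.toNat ((m.getD r'.toNat []).set c.toNat v)).getD r'.toNat []
        = (m.getD r'.toNat []).set c.toNat v := by
      rw [List.getD_eq_getElem _ _ (by simpa using hrn)]
      exact List.getElem_set_self (by simpa using hrn)
    rw [houter]
    by_cases hc' : c' = c
    · subst hc'
      rw [if_pos ⟨rfl, rfl⟩]
      rw [List.getD_eq_getElem _ _ (by rw [List.length_set, hrowlen]; omega)]
      exact List.getElem_set_self (by rw [List.length_set, hrowlen]; omega)
    · rw [if_neg (by tauto)]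
      have hne : c.toNat ≠ c'.toNat := by omega
      simp only [List.getD, List.getElem?_set_ne hne]
  · rw [if_neg (by tauto)]
    have hne : r.toNat ≠ r'.toNat := by omega
    congr 1
    simp only [List.getD, List.getElem?_set_ne hne]

theorem pvColpass (T : List Int) (N : Nat) (i : Int) (hi0 : 0 ≤ i) (hiN : i < (N : Int)) :
    ∀ (d : Nat) (a b : Int), 0 ≤ a → b = a + d → a + d ≤ (N : Int) →
    ∀ (m : List (List Int)) (k : Int), pvShape N m →
    ∀ res, res = (PySem.List.pyRange a b 1).foldl
        (fun s j => (pvSet2 s.1 j i (PySem.List.pyGetD T s.2 0), s.2 + 1)) (m, k) →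
    pvShape N res.1 ∧ res.2 = k + d ∧
    ∀ (r c : Int), 0 ≤ r → r < (N : Int) → 0 ≤ c → c < (N : Int) →
      pvGet2 res.1 r c =
        if c = i ∧ a ≤ r ∧ r < a + d then PySem.List.pyGetD T (k + (r - a)) 0 else pvGet2 m r c := by
  intro d
  induction d with
  | zero =>
    intro a b ha0 hb haN m k hm res hres
    subst hb
    rw [PySem.List.pyRange_one_eq_nil (by omega)] at hres
    simp only [List.foldl_nil] at hres
    subst hres
    refine ⟨hm, by simp, ?_⟩
    intro r c hr0 hrN hc0 hcN
    rw [if_neg (by push_cast; omega)]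
  | succ d ih =>
    intro a b ha0 hb haN m k hm res hres
    subst hb
    have hstep : (a : Int) + (d + 1 : Nat) = (a + 1) + d := by push_cast; ring
    rw [PySem.List.pyRange_one_cons (by push_cast; omega), List.foldl_cons] at hres
    rw [hstep] at hres
    have haN' : (a + 1) + (d : Int) ≤ (N : Int) := by push_cast at haN ⊢; omega
    have hm' : pvShape N (pvSet2 m a i (PySem.List.pyGetD T k 0)) :=
      pvShape_pvSet2 hm a i ha0 (by push_cast at haN; omega) hi0 _
    obtain ⟨hsh, hcnt, hget⟩ := ih (a + 1) ((a+1) + d) (by omega) rfl haN' _ (k + 1) hm' res hres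
    refine ⟨hsh, by push_cast at hcnt ⊢; omega, ?_⟩
    intro r c hr0 hrN hc0 hcN
    rw [hget r c hr0 hrN hc0 hcN,
        pvGet2_pvSet2 hm a i ha0 (by push_cast at haN; omega) hi0 hiN _ r c hr0 hc0]
    by_cases h1 : c = i ∧ a + 1 ≤ r ∧ r < a + 1 + (d : Int)
    · rw [if_pos h1, if_pos (by push_cast; omega)]
      have : k + 1 + (r - (a + 1)) = k + (r - a) := by ring
      rw [this]
    · rw [if_neg h1]
      by_cases h2 : r = a ∧ c = i
      · rw [if_pos h2, if_pos (by push_cast; omega)]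
        have : k + (r - a) = k := by omega
        rw [this]
      · rw [if_neg h2, if_neg (by push_cast; omega)]

theorem pvPass1 (T : List Int) (N : Nat) :
    ∀ (d : Nat) (a : Int), 0 ≤ a → a + d = (N : Int) - 1 →
    ∀ (m : List (List Int)) (k : Int), pvShape N m →
    ∀ res, res = (PySem.List.pyRange a ((N : Int) - 1) 1).foldl
        (fun s i => (PySem.List.pyRange (1 + i) (N : Int) 1).foldl
          (fun s j => (pvSet2 s.1 j i (PySem.List.pyGetD T s.2 0), s.2 + 1)) s) (m, k) →
    pvShape N res.1 ∧ res.2 = k + pvSumLow (N : Int) a d ∧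
    ∀ (r c : Int), 0 ≤ r → r < (N : Int) → 0 ≤ c → c < (N : Int) →
      pvGet2 res.1 r c =
        if a ≤ c ∧ c < r then PySem.List.pyGetD T (k + pvSumLow (N : Int) a (c - a).toNat + (r - c - 1)) 0
        else pvGet2 m r c := by
  intro d
  induction d with
  | zero =>
    intro a ha0 haN m k hm res hres
    rw [PySem.List.pyRange_one_eq_nil (by omega)] at hres
    simp only [List.foldl_nil] at hres
    subst hres
    refine ⟨hm, by simp [pvSumLow], ?_⟩
    intro r c hr0 hrN hc0 hcN
    rw [if_neg (by push_cast at haN ⊢; omega)]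
  | succ d ih =>
    intro a ha0 haN m k hm res hres
    have hcast : ((d + 1 : Nat) : Int) = (d : Int) + 1 := by push_cast; ring
    rw [hcast] at haN
    rw [PySem.List.pyRange_one_cons (by omega), List.foldl_cons] at hres
    -- the head column a via pvColpass
    obtain ⟨hsh', hcnt', hget'⟩ := pvColpass T N a ha0 (by omega) (d + 1) (1 + a) (N : Int)
      (by omega) (by push_cast; omega) (by push_cast; omega) m k hm _ rfl
    obtain ⟨hsh, hcnt, hget⟩ := ih (a + 1) (by omega) (by omega)
      _ _ hsh' res hres
    constructor
    · exact hsh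
    constructor
    · rw [hcnt, hcnt']
      simp only [pvSumLow]
      push_cast at haN ⊢
      generalize pvSumLow (N : Int) (a + 1) d = S
      omega
    · intro r c hr0 hrN hc0 hcN
      rw [hget r c hr0 hrN hc0 hcN, hget' r c hr0 hrN hc0 hcN]
      by_cases h1 : a + 1 ≤ c ∧ c < r
      · rw [if_pos h1, if_pos (by omega)]
        have he : (c - a).toNat = (c - (a + 1)).toNat + 1 := by omega
        rw [he]
        simp only [pvSumLow]
        have harg : k + (d + 1 : Nat) + pvSumLow (N : Int) (a + 1) (c - (a + 1)).toNat + (r - c - 1)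
            = k + (((N : Int) - 1 - a) + pvSumLow (N : Int) (a + 1) (c - (a + 1)).toNat) + (r - c - 1) := by
          push_cast at haN ⊢
          generalize pvSumLow (N : Int) (a + 1) (c - (a + 1)).toNat = S
          omega
        rw [hcnt', harg]
      · rw [if_neg h1]
        by_cases h2 : c = a ∧ 1 + a ≤ r ∧ r < 1 + a + ((d + 1 : Nat) : Int)
        · rw [if_pos h2, if_pos (by push_cast at h2 ⊢; omega)]
          have he : (c - a).toNat = 0 := by omega
          rw [he]
          simp only [pvSumLow]
          have harg : k + (r - (1 + a)) = k + 0 + (r - c - 1) := by omega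
          rw [harg]
        · rw [if_neg h2, if_neg (by push_cast at h2 haN ⊢; omega)]

theorem pvPass2 (T : List Int) (N : Nat) :
    ∀ (d : Nat) (a : Int), 0 ≤ a → a + d = (N : Int) →
    ∀ (m : List (List Int)) (k : Int), pvShape N m →
    ∀ res, res = (PySem.List.pyRange a (N : Int) 1).foldl
        (fun s i => (pvSet2 s.1 i i (PySem.List.pyGetD T s.2 0), s.2 + 1)) (m, k) →
    pvShape N res.1 ∧ res.2 = k + d ∧
    ∀ (r c : Int), 0 ≤ r → r < (N : Int) → 0 ≤ c → c < (N : Int) →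
      pvGet2 res.1 r c =
        if r = c ∧ a ≤ r then PySem.List.pyGetD T (k + (r - a)) 0 else pvGet2 m r c := by
  intro d
  induction d with
  | zero =>
    intro a ha0 haN m k hm res hres
    rw [PySem.List.pyRange_one_eq_nil (by omega)] at hres
    simp only [List.foldl_nil] at hres
    subst hres
    refine ⟨hm, by simp, ?_⟩
    intro r c hr0 hrN hc0 hcN
    rw [if_neg (by omega)]
  | succ d ih =>
    intro a ha0 haN m k hm res hres
    have hcast : ((d + 1 : Nat) : Int) = (d : Int) + 1 := by push_cast; ring
    rw [hcast] at haN
    rw [PySem.List.pyRange_one_cons (by omega), List.foldl_cons] at hres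
    have hm' : pvShape N (pvSet2 m a a (PySem.List.pyGetD T k 0)) :=
      pvShape_pvSet2 hm a a ha0 (by omega) ha0 _
    obtain ⟨hsh, hcnt, hget⟩ := ih (a + 1) (by omega) (by omega) _ (k + 1) hm' res hres
    refine ⟨hsh, by push_cast at hcnt ⊢; omega, ?_⟩
    intro r c hr0 hrN hc0 hcN
    rw [hget r c hr0 hrN hc0 hcN,
        pvGet2_pvSet2 hm a a ha0 (by omega) ha0 (by omega) _ r c hr0 hc0]
    by_cases h1 : r = c ∧ a + 1 ≤ r
    · rw [if_pos h1, if_pos (by omega)]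
      have : k + 1 + (r - (a + 1)) = k + (r - a) := by ring
      rw [this]
    · rw [if_neg h1]
      by_cases h2 : r = a ∧ c = a
      · rw [if_pos h2, if_pos (by omega)]
        have : k + (r - a) = k := by omega
        rw [this]
      · rw [if_neg h2, if_neg (by omega)]

theorem pvPass3 (T : List Int) (N : Nat) :
    ∀ (d : Nat) (a : Int), 1 ≤ a → a + d = (N : Int) →
    ∀ (m : List (List Int)) (k : Int), pvShape N m →
    ∀ res, res = (PySem.List.pyRange a (N : Int) 1).foldl
        (fun s i => (PySem.List.pyRange 0 i 1).foldl
          (fun s j => (pvSet2 s.1 j i (PySem.List.pyGetD T s.2 0), s.2 + 1)) s) (m, k) →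
    pvShape N res.1 ∧ res.2 = k + pvSumUp a d ∧
    ∀ (r c : Int), 0 ≤ r → r < (N : Int) → 0 ≤ c → c < (N : Int) →
      pvGet2 res.1 r c =
        if a ≤ c ∧ r < c then PySem.List.pyGetD T (k + pvSumUp a (c - a).toNat + r) 0
        else pvGet2 m r c := by
  intro d
  induction d with
  | zero =>
    intro a ha0 haN m k hm res hres
    rw [PySem.List.pyRange_one_eq_nil (by omega)] at hres
    simp only [List.foldl_nil] at hres
    subst hres
    refine ⟨hm, by simp [pvSumUp], ?_⟩
    intro r c hr0 hrN hc0 hcN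
    rw [if_neg (by omega)]
  | succ d ih =>
    intro a ha0 haN m k hm res hres
    have hcast : ((d + 1 : Nat) : Int) = (d : Int) + 1 := by push_cast; ring
    rw [hcast] at haN
    rw [PySem.List.pyRange_one_cons (by omega), List.foldl_cons] at hres
    obtain ⟨hsh', hcnt', hget'⟩ := pvColpass T N a (by omega) (by omega) a.toNat 0 a
      (by omega) (by omega) (by omega) m k hm _ rfl
    obtain ⟨hsh, hcnt, hget⟩ := ih (a + 1) (by omega) (by omega) _ _ hsh' res hres
    constructor
    · exact hsh
    constructor
    · rw [hcnt, hcnt']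
      simp only [pvSumUp]
      generalize pvSumUp (a + 1) d = S
      omega
    · intro r c hr0 hrN hc0 hcN
      rw [hget r c hr0 hrN hc0 hcN, hget' r c hr0 hrN hc0 hcN]
      by_cases h1 : a + 1 ≤ c ∧ r < c
      · rw [if_pos h1, if_pos (by omega)]
        have he : (c - a).toNat = (c - (a + 1)).toNat + 1 := by omega
        rw [he]
        simp only [pvSumUp]
        have harg : k + a.toNat + pvSumUp (a + 1) (c - (a + 1)).toNat + r
            = k + (a + pvSumUp (a + 1) (c - (a + 1)).toNat) + r := by
          generalize pvSumUp (a + 1) (c - (a + 1)).toNat = S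
          omega
        rw [hcnt', harg]
      · rw [if_neg h1]
        by_cases h2 : c = a ∧ 0 ≤ r ∧ r < 0 + (a.toNat : Int)
        · rw [if_pos h2, if_pos (by omega)]
          have he : (c - a).toNat = 0 := by omega
          rw [he]
          simp only [pvSumUp]
          have harg : k + (r - 0) = k + 0 + r := by omega
          rw [harg]
        · rw [if_neg h2, if_neg (by omega)]
theorem pvGet2_getElem (m : List (List Int)) (r c : Nat) (hr : r < m.length)
    (hc : c < (m[r]'hr).length) :
    pvGet2 m (r : Int) (c : Int) = (m[r]'hr)[c]'hc := by
  unfold pvGet2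
  simp only [Int.toNat_natCast]
  rw [List.getD_eq_getElem _ _ hr, List.getD_eq_getElem _ _ hc]

theorem to_cube_eq (T : List Int) (n : Int) : to_cube T n = to_cube_alt T n := by
  by_cases hn : n ≤ 0
  · simp [to_cube, to_cube_alt, PySem.List.pyRange_one_eq_nil (show n ≤ 0 from hn),
      PySem.List.pyRange_one_eq_nil (show n - 1 ≤ 0 by omega),
      PySem.List.pyRange_one_eq_nil (show n ≤ 1 by omega)]
  · have hn' : 0 < n := by omega
    obtain ⟨N, rfl⟩ : ∃ N : Nat, n = (N : Int) := ⟨n.toNat, (Int.toNat_of_nonneg hn'.le).symm⟩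
    have hN : 1 ≤ N := by omega
    have hm0sh : pvShape N
        ((PySem.List.pyRange 0 (N : Int) 1).map
          (fun _ => (PySem.List.pyRange 0 (N : Int) 1).map (fun _ => (0 : Int)))) := by
      constructor
      · simp [PySem.List.length_pyRange_one]
      · intro row hrow
        obtain ⟨_, _, rfl⟩ := List.mem_map.1 hrow
        simp [PySem.List.length_pyRange_one]
    obtain ⟨hsh1, hcnt1, hget1⟩ := pvPass1 T N (N - 1) 0 le_rfl (by omega)
      _ 0 hm0sh _ rfl
    obtain ⟨hsh2, hcnt2, hget2⟩ := pvPass2 T N N 0 le_rfl (by omega)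
      _ _ hsh1 _ rfl
    obtain ⟨hsh3, hcnt3, hget3⟩ := pvPass3 T N (N - 1) 1 le_rfl (by omega)
      _ _ hsh2 _ rfl
    have hLowF : ∀ c : Nat, PySem.Int.floordiv ((c : Int) * (2 * (N : Int) - (c : Int) - 1)) 2
        = pvSumLow (N : Int) 0 c :=
      fun c => pv_floordiv_double _ _ (by linear_combination - pvSumLow_closed (N : Int) c 0)
    have hLfact : PySem.Int.floordiv ((N : Int) * ((N : Int) - 1)) 2 = pvSumLow (N : Int) 0 (N - 1) := by
      refine pv_floordiv_double _ _ ?_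
      have h := pvSumLow_closed (N : Int) (N - 1) 0
      have hc : ((N - 1 : Nat) : Int) = (N : Int) - 1 := by omega
      rw [hc] at h
      linear_combination - h
    have hUpF : ∀ c : Nat, 1 ≤ c →
        PySem.Int.floordiv ((c : Int) * ((c : Int) - 1)) 2 = pvSumUp 1 (c - 1) := by
      intro c h1
      refine pv_floordiv_double _ _ ?_
      have h := pvSumUp_closed (c - 1) 1
      have hc : ((c - 1 : Nat) : Int) = (c : Int) - 1 := by omega
      rw [hc] at h
      linear_combination - h
    simp only [to_cube, to_cube_alt]
    refine List.ext_getElem ?_ ?_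
    · rw [hsh3.1]
      simp [PySem.List.length_pyRange_one]
    · intro i h1 h2
      have hiN : i < N := by rw [hsh3.1] at h1; exact h1
      rw [List.getElem_map, PySem.List.getElem_pyRange_one]
      refine List.ext_getElem ?_ ?_
      · rw [hsh3.2 _ (List.getElem_mem _)]
        simp [PySem.List.length_pyRange_one]
      · intro j h1' h2'
        have hjN : j < N := by rw [hsh3.2 _ (List.getElem_mem _)] at h1'; exact h1'
        rw [List.getElem_map, PySem.List.getElem_pyRange_one]
        rw [← pvGet2_getElem _ i j h1 h1']
        simp only [zero_add]
        rw [hget3 (i : Int) (j : Int) (by omega) (by omega) (by omega) (by omega)]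
        rcases lt_trichotomy (j : Int) (i : Int) with hlt | heq | hgt
        · -- lower triangle: written by pass 1
          rw [if_neg (by omega), hget2 (i : Int) (j : Int) (by omega) (by omega) (by omega) (by omega)]
          rw [if_neg (by omega), hget1 (i : Int) (j : Int) (by omega) (by omega) (by omega) (by omega)]
          rw [if_pos (by omega), if_pos hlt]
          rw [hLowF j, show ((j : Int) - 0).toNat = j by omega]
          congr 1
          ring
        · -- diagonal: written by pass 2
          rw [if_neg (by omega), hget2 (i : Int) (j : Int) (by omega) (by omega) (by omega) (by omega)]
          rw [if_pos (by omega), if_neg (by omega), if_pos heq]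
          rw [hLfact, hcnt1]
          congr 1
          generalize pvSumLow (N : Int) 0 (N - 1) = S
          omega
        · -- upper triangle: written by pass 3
          rw [if_pos (by omega), if_neg (by omega), if_neg (by omega)]
          rw [hLfact, hUpF j (by omega), hcnt2, hcnt1]
          rw [show ((j : Int) - 1).toNat = j - 1 by omega]
          congr 1
          generalize pvSumLow (N : Int) 0 (N - 1) = S1
          generalize pvSumUp 1 (j - 1) = S2
          omega

-- ===== VERDICT (by name: the statement is the Claim_ definition above) =====
theorem to_cube_spec : Claim_equal_to_cube := by
  intro T n _ _
  exact to_cube_eq T n
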